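-- pv_equiv track=rewrite | github.com/Captainmorgan37/AirSprint-Tools | arrival_weather_utils.py | _combine_highlight_levels
-- ===== SOURCE A (Python) =====
-- from typing import Any, Iterable, Iterator, List, Optional
--
-- _HIGHLIGHT_SEVERITY = {"yellow": 1, "red": 2}
--
-- def _combine_highlight_levels(levels: Iterable[Optional[str]]) -> Optional[str]:
--     """Return the strongest highlight level from the provided candidates."""
--
--     best_level: Optional[str] = None
--     best_score = -1
--     for level in levels:
--         if not level:
--             continue
--         score = _HIGHLIGHT_SEVERITY.get(level, 0)
--         if score > best_score:
--             best_level = level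
--             best_score = score
--     return best_level
-- ===== SOURCE B (Python) =====
-- _HIGHLIGHT_SEVERITY = {"yellow": 1, "red": 2}
--
-- def _combine_highlight_levels(levels):
--     """Return the strongest highlight level from the provided candidates."""
--     items = [l for l in levels if l]
--     if not items:
--         return None
--     if "red" in items:
--         return "red"
--     if "yellow" in items:
--         return "yellow"
--     return items[0]
-- ===== Notes on version B (the rewrite author's own statement) =====
-- stated objective: simpler
-- what changed: Replaces the best-score fold with a one-pass filter of truthy candidates followed by priority membership tests ('red', then 'yellow', else first candidate), with no score accumulator.
import Mathlib
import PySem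

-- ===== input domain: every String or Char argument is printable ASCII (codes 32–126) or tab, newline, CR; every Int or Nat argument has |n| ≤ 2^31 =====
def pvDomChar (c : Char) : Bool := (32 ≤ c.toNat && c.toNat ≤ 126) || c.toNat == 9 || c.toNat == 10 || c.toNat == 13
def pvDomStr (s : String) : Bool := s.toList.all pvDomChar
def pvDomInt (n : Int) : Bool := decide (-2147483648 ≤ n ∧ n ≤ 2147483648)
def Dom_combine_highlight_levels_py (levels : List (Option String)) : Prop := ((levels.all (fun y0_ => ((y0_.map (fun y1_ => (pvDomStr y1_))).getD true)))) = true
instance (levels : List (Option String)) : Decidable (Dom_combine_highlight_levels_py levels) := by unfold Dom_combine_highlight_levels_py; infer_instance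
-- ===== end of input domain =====

-- B replaces A's best-score fold by a filter of truthy candidates plus priority membership tests; objective: simpler.

-- ===== PORT A =====
-- _HIGHLIGHT_SEVERITY = {"yellow": 1, "red": 2}
def pvSeverity : PySem.Dict String Int := PySem.Dict.ofList [("yellow", 1), ("red", 2)]

-- the loop body: skip falsy levels, keep (best_level, best_score)
def pvStepA (st : Option String × Int) (level : Option String) : Option String × Int :=
  match level with
  | none => st
  | some s =>
      if s = "" then st
      else
        let score := PySem.Dict.getD pvSeverity s 0
        if st.2 < score then (some s, score) else st

def combine_highlight_levels_py (levels : List (Option String)) : Option String :=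
  (levels.foldl pvStepA (none, -1)).1

-- ===== PORT B =====
-- items = [l for l in levels if l]
def pvTruthy (level : Option String) : Option String :=
  match level with
  | none => none
  | some s => if s = "" then none else some s

def combine_highlight_levels_py_alt (levels : List (Option String)) : Option String :=
  let items := levels.filterMap pvTruthy
  if items = [] then none
  else if "red" ∈ items then some "red"
  else if "yellow" ∈ items then some "yellow"
  else items.head?

-- ===== PRECONDITION & SPEC =====
def Spec_combine_highlight_levels_py (levels : List (Option String)) (out : Option String) : Prop := out = combine_highlight_levels_py_alt levels
instance (levels : List (Option String)) (out : Option String) : Decidable (Spec_combine_highlight_levels_py levels out) := by unfold Spec_combine_highlight_levels_py; infer_instance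

-- ===== CLAIM (what is proved, stated in full; the proofs are below) =====
def Claim_equal_combine_highlight_levels_py : Prop := ∀ (levels : List (Option String)), Dom_combine_highlight_levels_py levels → Spec_combine_highlight_levels_py levels (combine_highlight_levels_py levels)

-- ===== LEMMAS AND PROOFS =====

theorem pvScore_eq (s : String) :
    PySem.Dict.getD pvSeverity s 0 = if s = "yellow" then 1 else if s = "red" then 2 else 0 := by
  have h : pvSeverity = PySem.Dict.mk [("yellow", 1), ("red", 2)] := by decide
  rw [h]
  by_cases hy : s = "yellow"
  · subst hy; simp [PySem.Dict.getD, PySem.Dict.get?_mk_cons]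
  · by_cases hr : s = "red"
    · subst hr; simp [PySem.Dict.getD, PySem.Dict.get?_mk_cons]
    · simp [PySem.Dict.getD, hy, hr, beq_iff_eq,
            Ne.symm hy, Ne.symm hr, PySem.Dict.get?]

-- once best_score = 2, the fold never changes best_level
theorem pvFold_two (levels : List (Option String)) (bl : Option String) :
    (levels.foldl pvStepA (bl, 2)).1 = bl := by
  induction levels generalizing bl with
  | nil => rfl
  | cons l t ih =>
      cases l with
      | none => simpa [pvStepA] using ih bl
      | some s =>
          by_cases hs : s = ""
          · simpa [pvStepA, hs] using ih bl
          · have : pvStepA (bl, 2) (some s) = (bl, 2) := by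
              simp [pvStepA, hs, pvScore_eq]
              split_ifs <;> omega
            rw [List.foldl_cons, this]; exact ih bl

-- with best_score = 1, only a later "red" can win
theorem pvFold_one (levels : List (Option String)) (bl : Option String) :
    (levels.foldl pvStepA (bl, 1)).1 =
      if "red" ∈ levels.filterMap pvTruthy then some "red" else bl := by
  induction levels generalizing bl with
  | nil => rfl
  | cons l t ih =>
      cases l with
      | none => simpa [pvStepA, List.filterMap_cons, pvTruthy] using ih bl
      | some s =>
          by_cases hs : s = ""
          · simpa [pvStepA, hs, List.filterMap_cons, pvTruthy] using ih bl
          · rw [List.foldl_cons]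
            by_cases hr : s = "red"
            · have : pvStepA (bl, 1) (some s) = (some "red", 2) := by
                simp [pvStepA, hr, pvScore_eq]
              rw [this, pvFold_two]
              simp [pvTruthy, hr]
            · have : pvStepA (bl, 1) (some s) = (bl, 1) := by
                simp [pvStepA, hs, pvScore_eq]
                split_ifs <;> omega
              rw [this, ih bl]
              simp [pvTruthy, hs, Ne.symm hr]

-- with best_score = 0, "red" then "yellow" can win
theorem pvFold_zero (levels : List (Option String)) (bl : Option String) :
    (levels.foldl pvStepA (bl, 0)).1 =
      if "red" ∈ levels.filterMap pvTruthy then some "red"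
      else if "yellow" ∈ levels.filterMap pvTruthy then some "yellow" else bl := by
  induction levels generalizing bl with
  | nil => rfl
  | cons l t ih =>
      cases l with
      | none => simpa [pvStepA, List.filterMap_cons, pvTruthy] using ih bl
      | some s =>
          by_cases hs : s = ""
          · simpa [pvStepA, hs, List.filterMap_cons, pvTruthy] using ih bl
          · rw [List.foldl_cons]
            by_cases hr : s = "red"
            · have : pvStepA (bl, 0) (some s) = (some "red", 2) := by
                simp [pvStepA, hr, pvScore_eq]
              rw [this, pvFold_two]
              simp [pvTruthy, hr]
            · by_cases hy : s = "yellow"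
              · have : pvStepA (bl, 0) (some s) = (some "yellow", 1) := by
                  simp [pvStepA, hy, pvScore_eq]
                rw [this, pvFold_one]
                simp [pvTruthy, hy]
              · have : pvStepA (bl, 0) (some s) = (bl, 0) := by
                  simp [pvStepA, hs, pvScore_eq, hr, hy]
                rw [this, ih bl]
                simp [pvTruthy, hs, Ne.symm hr, Ne.symm hy]

theorem pvFold_start (levels : List (Option String)) :
    (levels.foldl pvStepA (none, -1)).1 = combine_highlight_levels_py_alt levels := by
  induction levels with
  | nil => rfl
  | cons l t ih =>
      cases l with
      | none =>
          rw [List.foldl_cons]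
          show (t.foldl pvStepA (none, -1)).1 = _
          rw [ih]
          simp [combine_highlight_levels_py_alt, pvTruthy]
      | some s =>
          by_cases hs : s = ""
          · rw [List.foldl_cons]
            have : pvStepA (none, -1) (some s) = (none, -1) := by simp [pvStepA, hs]
            rw [this, ih]
            simp [combine_highlight_levels_py_alt, pvTruthy, hs]
          · rw [List.foldl_cons]
            by_cases hr : s = "red"
            · have : pvStepA (none, -1) (some s) = (some "red", 2) := by
                simp [pvStepA, hr, pvScore_eq]
              rw [this, pvFold_two]
              simp [combine_highlight_levels_py_alt, pvTruthy, hr]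
            · by_cases hy : s = "yellow"
              · have : pvStepA (none, -1) (some s) = (some "yellow", 1) := by
                  simp [pvStepA, hy, pvScore_eq]
                rw [this, pvFold_one]
                simp [combine_highlight_levels_py_alt, pvTruthy, hy]
              · have : pvStepA (none, -1) (some s) = (some s, 0) := by
                  simp [pvStepA, hs, pvScore_eq, hr, hy]
                rw [this, pvFold_zero]
                simp [combine_highlight_levels_py_alt, pvTruthy, hs,
                      Ne.symm hr, Ne.symm hy]

-- ===== VERDICT (by name: the statement is the Claim_ definition above) =====
theorem combine_highlight_levels_py_spec : Claim_equal_combine_highlight_levels_py := by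
  intro levels _
  unfold Spec_combine_highlight_levels_py combine_highlight_levels_py
  exact pvFold_start levels
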